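/- GENERATED by c/gen_decode.py: decode facts of the image, one per distinct instruction byte string. -/
import UserX.DecodeImage

#decode_all Vorbis.Dec
  "0f28e0"  -- movaps xmm4,xmm0
  "0f8482000000"  -- je 103609
  "0f8525010000"  -- jne 10cdc9
  "0f8a72010000"  -- jp 102757
  "0f8fd6feffff"  -- jg 116233
  "0fb6db"  -- movzx ebx,bl
  "39d3"  -- cmp ebx,edx
  "410fb6460d"  -- movzx eax,BYTE PTR [r14+0xd]
  "416bf538"  -- imul esi,r13d,0x38
  "41895e04"  -- mov DWORD PTR [r14+0x4],ebx
  "418b85e8060000"  -- mov eax,DWORD PTR [r13+0x6e8]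
  "41c7860800c00004f3f3f3"  -- mov DWORD PTR [r14+0xc00008],0xf3f3f304
  "440fb633"  -- movzx r14d,BYTE PTR [rbx]
  "4439fb"  -- cmp ebx,r15d
  "4489750c"  -- mov DWORD PTR [rbp+0xc],r14d
  "448b2b"  -- mov r13d,DWORD PTR [rbx]
  "448bb3e4060000"  -- mov r14d,DWORD PTR [rbx+0x6e4]
  "453b6710"  -- cmp r12d,DWORD PTR [r15+0x10]
  "458b6c24fc"  -- mov r13d,DWORD PTR [r12-0x4]
  "48036b28"  -- add rbp,QWORD PTR [rbx+0x28]
  "48639d28ffffff"  -- movsxd rbx,DWORD PTR [rbp-0xd8]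
  "4883c308"  -- add rbx,0x8
  "48894c2408"  -- mov QWORD PTR [rsp+0x8],rcx
  "4889f8"  -- mov rax,rdi
  "488b7c2418"  -- mov rdi,QWORD PTR [rsp+0x18]
  "488d41e3"  -- lea rax,[rcx-0x1d]
  "488d7bcc"  -- lea rdi,[rbx-0x34]
  "488da8a8000000"  -- lea rbp,[rax+0xa8]
  "488dbcac80020000"  -- lea rdi,[rsp+rbp*4+0x280]
  "48c1e502"  -- shl rbp,0x2
  "49031c24"  -- add rbx,QWORD PTR [r12]
  "49837e7000"  -- cmp QWORD PTR [r14+0x70],0x0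
  "498bbe38080000"  -- mov rdi,QWORD PTR [r14+0x838]
  "498d7e1b"  -- lea rdi,[r14+0x1b]
  "49c7850000c00000000000"  -- mov QWORD PTR [r13+0xc00000],0x0
  "4b8d0424"  -- lea rax,[r12+r12*1]
  "4c63ee"  -- movsxd r13,esi
  "4c89ff"  -- mov rdi,r15
  "4c8d2c8500000000"  -- lea r13,[rax*4+0x0]
  "4d63e4"  -- movsxd r12,r12d
  "4d8db5a8000000"  -- lea r14,[r13+0xa8]
  "660f570510db0100"  -- xorpd xmm0,XMMWORD PTR [rip+0x1db10]
  "66410f7ef7"  -- movd r15d,xmm6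
  "7216"  -- jb 104e7e
  "744f"  -- je 111b94
  "754c"  -- jne 10b43f
  "7a1a"  -- jp 102abb
  "7e6c"  -- jle 10df69
  "80bc24a500000061"  -- cmp BYTE PTR [rsp+0xa5],0x61
  "83c302"  -- add ebx,0x2
  "89442420"  -- mov DWORD PTR [rsp+0x20],eax
  "8985e8060000"  -- mov DWORD PTR [rbp+0x6e8],eax
  "8b44240c"  -- mov eax,DWORD PTR [rsp+0xc]
  "8b742420"  -- mov esi,DWORD PTR [rsp+0x20]
  "8d2cc500000000"  -- lea ebp,[rax*8+0x0]
  "be00161200"  -- mov esi,0x121600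
  "c683d406000000"  -- mov BYTE PTR [rbx+0x6d4],0x0
  "c7839400c000000000f3"  -- mov DWORD PTR [rbx+0xc00094],0xf3000000
  "e803acfeff"  -- call 100800
  "e80d59ffff"  -- call 103d00
  "e817b9feff"  -- call 100640
  "e820fffeff"  -- call 103d00
  "e82ab5feff"  -- call 100300
  "e832ffffff"  -- call 10d040
  "e83eb7feff"  -- call 100640
  "e848c3ffff"  -- call 100720
  "e853a8feff"  -- call 100640
  "e85ffbffff"  -- call 102040
  "e86cadfeff"  -- call 100720
  "e8777effff"  -- call 100640
  "e88336ffff"  -- call 1003c0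
  "e88e10ffff"  -- call 104d40
  "e89765ffff"  -- call 100640
  "e8a12fffff"  -- call 100640
  "e8ac9effff"  -- call 100640
  "e8b4fefeff"  -- call 103d00
  "e8bf8effff"  -- call 10d1c0
  "e8c9aeffff"  -- call 100640
  "e8d491ffff"  -- call 100800
  "e8df2dffff"  -- call 100640
  "e8e7f4ffff"  -- call 100059
  "e8efa6feff"  -- call 100800
  "e8fa1fffff"  -- call 100800
  "e924ffffff"  -- jmp 1143fb
  "e969ffffff"  -- jmp 108ab9
  "e9c5feffff"  -- jmp 1119bc
  "eb18"  -- jmp 1018fa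
  "eba8"  -- jmp 114ca3
  "f20f100c24"  -- movsd xmm1,QWORD PTR [rsp]
  "f20f5905e0df0100"  -- mulsd xmm0,QWORD PTR [rip+0x1dfe0]
  "f20f5ed0"  -- divsd xmm2,xmm0
  "f30f105da4"  -- movss xmm3,DWORD PTR [rbp-0x5c]
  "f30f112424"  -- movss DWORD PTR [rsp],xmm4
  "f30f115c241c"  -- movss DWORD PTR [rsp+0x1c],xmm3
  "f30f5805c8490100"  -- addss xmm0,DWORD PTR [rip+0x149c8]
  "f30f594564"  -- mulss xmm0,DWORD PTR [rbp+0x64]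
  "f30f5cc6"  -- subss xmm0,xmm6
  "f3410f1106"  -- movss DWORD PTR [r14],xmm0
  "ffd0"  -- call rax
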